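-- pv_equiv track=rewrite | github.com/niemmi/algolib | algolib/binary_indexed_tree/bit.py | query_point
-- ===== SOURCE A (Python) =====
-- def query_point(tree, index):
--     """Returns a value from given index.
--
--     Args:
--         tree: BIT
--         index: Index of the value to return
--
--     Returns:
--         Value in given index
--     """
--     res = tree[index]
--     end = index - (index & -index)
--     index -= 1
--
--     while index != end:
--         res -= tree[index]
--         index -= (index & -index)
--
--     return res
-- ===== SOURCE B (Python) =====
-- def query_point(tree, index):
--     """Returns a value from given index.
--
--     Computed as the difference of two BIT prefix sums, each obtained by a
--     recursive descent along parents (i -> i - (i & -i)) instead of A's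
--     single fused subtraction loop.
--     """
--     def prefix(i):
--         if i <= 0:
--             return 0
--         return tree[i] + prefix(i - (i & -i))
--
--     return prefix(index) - prefix(index - 1)
-- ===== Notes on version B (the rewrite author's own statement) =====
-- stated objective: alternative
-- what changed: A's single fused subtraction loop (start at tree[index], walk index-1 down to index - (index & -index) subtracting entries) is replaced by the standard BIT decomposition prefix(index) - prefix(index-1), where prefix is a recursive descent along parents i -> i - (i & -i) summing entries.
-- outside the precondition, e.g. on query_point([5, 3, 2], -1): A returns 2, B returns 0; on query_point([5, 3, 2], 0): A raises IndexError, B returns 0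
import Mathlib
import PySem

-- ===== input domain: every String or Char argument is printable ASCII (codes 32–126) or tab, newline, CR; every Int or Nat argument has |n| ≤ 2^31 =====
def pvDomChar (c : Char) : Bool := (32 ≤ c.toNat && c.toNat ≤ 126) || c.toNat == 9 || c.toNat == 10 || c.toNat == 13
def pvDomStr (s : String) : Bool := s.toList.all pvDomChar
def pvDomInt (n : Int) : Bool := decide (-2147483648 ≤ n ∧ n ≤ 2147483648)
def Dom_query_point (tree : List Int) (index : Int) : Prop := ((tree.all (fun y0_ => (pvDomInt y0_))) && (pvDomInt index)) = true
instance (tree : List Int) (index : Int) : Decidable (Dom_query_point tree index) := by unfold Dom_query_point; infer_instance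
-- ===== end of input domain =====

-- B replaces A's fused subtraction loop by the standard two-prefix-sum BIT
-- decomposition prefix(index) - prefix(index-1), with prefix a recursive
-- descent along parents; equal on valid 1-based indices, same cost.

-- ===== PORT A =====
-- The while-loop of A.  `fuel` is only a totality guard: each iteration of
-- Python's loop decreases `index` by its low bit (at least 1 while positive),
-- so with fuel = (starting index).toNat the guard is never the reason we stop
-- on any input admitted by Pre_ (inputs that would exhaust it raise in Python).
def query_loop (tree : List Int) (fuel : Nat) (index end_ res : Int) : Int :=
  match fuel with
  | 0 => res
  | fuel + 1 =>
    if index = end_ then res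
    else
      query_loop tree fuel (index - PySem.Int.band index (-index)) end_
        (res - ((PySem.List.pyGet? tree index).getD 0))

def query_point (tree : List Int) (index : Int) : Int :=
  let res := (PySem.List.pyGet? tree index).getD 0
  let end_ := index - PySem.Int.band index (-index)
  query_loop tree (index - 1).toNat (index - 1) end_ res

-- ===== PORT B =====
-- Facts about Python's `i & -i` (the BIT low-bit step); the first three are
-- cited by name in bit_prefix's decreasing_by, so they live above the port.
theorem pv_band_neg_self (n : Nat) (h : 1 ≤ n) :
    PySem.Int.band (n : Int) (-(n : Int)) = ((n - (n &&& (n - 1)) : Nat) : Int) := by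
  have h1 : ¬ (0 ≤ -(n : Int)) := by omega
  have e1 : ((n : Int)).toNat = n := by omega
  have e2 : (-(-(n : Int)) - 1).toNat = n - 1 := by omega
  simp only [PySem.Int.band, Int.natCast_nonneg, if_true, h1, if_false, e1, e2]

theorem pv_lowbit_pos {i : Int} (h : 0 < i) : 0 < PySem.Int.band i (-i) := by
  have hn : i = ((i.toNat : Nat) : Int) := by omega
  rw [hn, pv_band_neg_self i.toNat (by omega)]
  have := @Nat.and_le_right i.toNat (i.toNat - 1)
  omega

theorem pv_lowbit_le {i : Int} (h : 0 < i) : PySem.Int.band i (-i) ≤ i := by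
  have hn : i = ((i.toNat : Nat) : Int) := by omega
  rw [hn, pv_band_neg_self i.toNat (by omega)]
  omega

-- B's `prefix`: a recursive descent summing tree[i] along i -> i - (i & -i).
def bit_prefix (tree : List Int) (i : Int) : Int :=
  if h : 0 < i then
    ((PySem.List.pyGet? tree i).getD 0) +
      bit_prefix tree (i - PySem.Int.band i (-i))
  else 0
termination_by i.toNat
decreasing_by
  have h1 := pv_lowbit_pos h
  have h2 := pv_lowbit_le h
  omega

def query_point_alt (tree : List Int) (index : Int) : Int :=
  bit_prefix tree index - bit_prefix tree (index - 1)

-- ===== PRECONDITION & SPEC =====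
-- Pre_ restricts to the valid 1-based BIT indices (1 ≤ index < len(tree)); outside it
-- A raises IndexError or, for some negative indices, returns accidental values produced
-- by Python's negative-index wraparound that neither implementation would specify.
def Pre_query_point (tree : List Int) (index : Int) : Prop :=
  1 ≤ index ∧ index < tree.length

instance (tree : List Int) (index : Int) : Decidable (Pre_query_point tree index) := by
  unfold Pre_query_point; infer_instance

def pvWitness_query_point : List Int × Int := ([5, 3, 2], 2)

def Spec_query_point (tree : List Int) (index : Int) (out : Int) : Prop := out = query_point_alt tree index
instance (tree : List Int) (index : Int) (out : Int) : Decidable (Spec_query_point tree index out) := by unfold Spec_query_point; infer_instance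

-- ===== CLAIM (what is proved, stated in full; the proofs are below) =====
def Claim_equal_query_point : Prop := ∀ (tree : List Int) (index : Int), Dom_query_point tree index → Pre_query_point tree index → Spec_query_point tree index (query_point tree index)

-- ===== LEMMAS AND PROOFS =====

-- Nat-level characterisation of the low bit: odd and even cases.
theorem pv_nat_land_odd (k : Nat) : (2 * k + 1) &&& (2 * k) = 2 * k := by
  apply Nat.eq_of_testBit_eq
  intro i
  cases i with
  | zero =>
    simp [Nat.testBit_zero, Nat.mul_add_mod]
  | succ i =>
    have e1 : (2 * k + 1) / 2 = k := by omega
    have e2 : (2 * k) / 2 = k := by omega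
    rw [Nat.testBit_land]
    simp only [Nat.testBit_succ]
    rw [e1, e2]
    exact Bool.and_self _

theorem pv_nat_land_even (k : Nat) (h : 1 ≤ k) :
    (2 * k) &&& (2 * k - 1) = 2 * (k &&& (k - 1)) := by
  apply Nat.eq_of_testBit_eq
  intro i
  cases i with
  | zero =>
    simp [Nat.testBit_zero, Nat.mul_mod_right]
  | succ i =>
    have e1 : (2 * k) / 2 = k := by omega
    have e2 : (2 * k - 1) / 2 = k - 1 := by omega
    have e3 : (2 * (k &&& (k - 1))) / 2 = k &&& (k - 1) := by omega
    rw [Nat.testBit_land]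
    simp only [Nat.testBit_succ]
    rw [e1, e2, e3, Nat.testBit_land]

-- Int-level: low bit of an odd positive number is 1.
theorem pv_lowbit_odd (k : Nat) :
    PySem.Int.band ((2 * k + 1 : Nat) : Int) (-((2 * k + 1 : Nat) : Int)) = 1 := by
  rw [pv_band_neg_self (2 * k + 1) (by omega)]
  have e : (2 * k + 1) - 1 = 2 * k := by omega
  rw [e, pv_nat_land_odd]
  omega

-- Int-level: low bit doubles with the argument.
theorem pv_lowbit_double (k : Nat) (h : 1 ≤ k) :
    PySem.Int.band ((2 * k : Nat) : Int) (-((2 * k : Nat) : Int)) =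
      2 * PySem.Int.band ((k : Nat) : Int) (-((k : Nat) : Int)) := by
  rw [pv_band_neg_self (2 * k) (by omega), pv_band_neg_self k h, pv_nat_land_even k h]
  have := @Nat.and_le_right k (k - 1)
  omega

-- Reachability along the BIT prefix walk i ↦ i - (i & -i).
inductive PvReach : Int → Int → Prop
  | refl (a : Int) : PvReach a a
  | step {a b : Int} : 0 < a → PvReach (a - PySem.Int.band a (-a)) b → PvReach a b

theorem pv_reach_le {a b : Int} (h : PvReach a b) : b ≤ a := by
  induction h with
  | refl => omega
  | step h0 _ ih =>
    have := pv_lowbit_pos h0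
    omega

theorem pv_reach_double {x y : Int} (h : PvReach x y) : PvReach (2 * x) (2 * y) := by
  induction h with
  | refl => exact PvReach.refl _
  | step h0 h1 ih =>
    rename_i a b
    have hn : ((a.toNat : Nat) : Int) = a := by omega
    have hd := pv_lowbit_double a.toNat (by omega)
    push_cast at hd
    rw [hn] at hd
    refine PvReach.step (by omega) ?_
    have e : 2 * a - PySem.Int.band (2 * a) (-(2 * a)) = 2 * (a - PySem.Int.band a (-a)) := by
      omega
    rw [e]
    exact ih

-- The prefix walk started at n - 1 reaches n - (n & -n), for every n ≥ 1.
theorem pv_reach_main : ∀ (n : Nat), 1 ≤ n →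
    PvReach ((n : Int) - 1) ((n : Int) - PySem.Int.band (n : Int) (-(n : Int))) := by
  intro n
  induction n using Nat.strong_induction_on with
  | _ n ih =>
    intro hn
    rcases Nat.even_or_odd n with ⟨k, hk⟩ | ⟨k, hk⟩
    · -- n = 2k, k ≥ 1
      have hk1 : 1 ≤ k := by omega
      have hn2 : n = 2 * k := by omega
      subst hn2
      refine PvReach.step (by push_cast; omega) ?_
      have e1 : ((2 * k : Nat) : Int) - 1 = ((2 * (k - 1) + 1 : Nat) : Int) := by push_cast; omega
      have e2 := pv_lowbit_odd (k - 1)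
      have e3 : ((2 * k : Nat) : Int) - 1 - PySem.Int.band (((2 * k : Nat) : Int) - 1) (-(((2 * k : Nat) : Int) - 1)) = 2 * ((k : Int) - 1) := by
        rw [e1, e2]; push_cast; omega
      rw [e3]
      have hd := pv_lowbit_double k hk1
      have e4 : ((2 * k : Nat) : Int) - PySem.Int.band ((2 * k : Nat) : Int) (-((2 * k : Nat) : Int)) = 2 * ((k : Int) - PySem.Int.band (k : Int) (-(k : Int))) := by
        rw [hd]; push_cast; ring
      rw [e4]
      exact pv_reach_double (ih k (by omega) hk1)
    · -- n = 2k + 1: the walk is already at the target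
      have hn2 : n = 2 * k + 1 := by omega
      subst hn2
      have e2 := pv_lowbit_odd k
      rw [e2]
      exact PvReach.refl _

-- Unfolding bit_prefix one BIT step, for positive i.
theorem bit_prefix_step (tree : List Int) {i : Int} (h : 0 < i) :
    bit_prefix tree i = ((PySem.List.pyGet? tree i).getD 0) +
      bit_prefix tree (i - PySem.Int.band i (-i)) := by
  rw [bit_prefix]
  rw [dif_pos h]

-- A's loop computes res minus the difference of the two prefix sums, along any walk.
theorem query_loop_eq (tree : List Int) {a b : Int} (h : PvReach a b) :
    ∀ (fuel : Nat) (res : Int), a.toNat ≤ fuel →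
      query_loop tree fuel a b res = res - (bit_prefix tree a - bit_prefix tree b) := by
  induction h with
  | refl a =>
    intro fuel res _
    cases fuel with
    | zero => rw [query_loop]; ring
    | succ fuel => rw [query_loop, if_pos rfl]; ring
  | step h0 h1 ih =>
    intro fuel res hfuel
    rename_i a b
    have hb : b ≤ a - PySem.Int.band a (-a) := pv_reach_le h1
    have h2 := pv_lowbit_pos h0
    have h3 := pv_lowbit_le h0
    cases fuel with
    | zero => omega
    | succ fuel =>
      rw [query_loop, if_neg (by omega), ih fuel _ (by omega), bit_prefix_step tree h0]
      ring

-- ===== VERDICT (by name: the statement is the Claim_ definition above) =====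
theorem query_point_spec : Claim_equal_query_point := by
  intro tree index _hDom hPre
  obtain ⟨h1, _h2⟩ := hPre
  unfold Spec_query_point query_point query_point_alt
  have hreach := pv_reach_main index.toNat (by omega)
  have hcast : ((index.toNat : Nat) : Int) = index := by omega
  rw [hcast] at hreach
  rw [query_loop_eq tree hreach (index - 1).toNat _ (le_refl _),
      bit_prefix_step tree (by omega : (0:Int) < index)]
  ring
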